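-- pv_equiv track=rewrite | github.com/TheNamlessGuy/tmv | tagger/src/database.py | split_query
-- ===== SOURCE A (Python) =====
-- def query_is_value_query(query):
--   if not query.endswith('}'):
--     return False
--
--   start_index = query.rfind('{')
--   if start_index == -1:
--     return False
--
--   val = query[start_index + 1:-1].strip()
--   if val.startswith(('>=', '<=', '!=', '<>')):
--     val = val[2:].strip()
--   elif val.startswith(('>', '<')):
--     val = val[1:].strip()
--   else:
--     return False
--
--   if val.startswith('-'):
--     val = val[1:]
--   return val.isdigit()
--
-- def split_query(query):
--   retval = {
--     'positive': [],
--     'negative': [],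
--     'pos_value': [],
--     'neg_value': []
--   }
--
--   for q in query:
--     if q.startswith('-'):
--       q = q[1:]
--       if query_is_value_query(q):
--         retval['neg_value'].append(q)
--       else:
--         retval['negative'].append(q)
--     elif query_is_value_query(q):
--       retval['pos_value'].append(q)
--     else:
--       retval['positive'].append(q)
--
--   return retval
-- ===== SOURCE B (Python) =====
-- def query_is_value_query(query):
--   if not query.endswith('}'):
--     return False
--
--   start_index = query.rfind('{')
--   if start_index == -1:
--     return False
--
--   val = query[start_index + 1:-1].strip()
--   if val.startswith(('>=', '<=', '!=', '<>')):
--     val = val[2:].strip()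
--   elif val.startswith(('>', '<')):
--     val = val[1:].strip()
--   else:
--     return False
--
--   if val.startswith('-'):
--     val = val[1:]
--   return val.isdigit()
--
-- def split_query(query):
--   return {
--     'positive': [q for q in query if not q.startswith('-') and not query_is_value_query(q)],
--     'negative': [q[1:] for q in query if q.startswith('-') and not query_is_value_query(q[1:])],
--     'pos_value': [q for q in query if not q.startswith('-') and query_is_value_query(q)],
--     'neg_value': [q[1:] for q in query if q.startswith('-') and query_is_value_query(q[1:])],
--   }
-- ===== Notes on version B (the rewrite author's own statement) =====
-- stated objective: alternative
-- what changed: A's single branching loop that appends to one of four dict buckets per element is replaced by four independent comprehension-style scans of the query list, one per bucket (filter, and for the negative buckets filter-then-strip the leading '-'), keeping the shared query_is_value_query helper unchanged.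
import Mathlib
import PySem

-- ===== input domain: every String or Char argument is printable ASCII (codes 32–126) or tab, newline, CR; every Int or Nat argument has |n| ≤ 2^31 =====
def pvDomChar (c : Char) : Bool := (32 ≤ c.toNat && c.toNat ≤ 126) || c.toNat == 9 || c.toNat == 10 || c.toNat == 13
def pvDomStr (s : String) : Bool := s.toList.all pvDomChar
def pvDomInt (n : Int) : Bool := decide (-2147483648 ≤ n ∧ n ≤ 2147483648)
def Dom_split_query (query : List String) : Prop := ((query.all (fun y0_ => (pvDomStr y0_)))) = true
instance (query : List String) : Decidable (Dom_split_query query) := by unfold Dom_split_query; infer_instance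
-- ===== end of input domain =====

-- B rewrites A's single branching loop as four independent comprehension-style scans,
-- one per bucket (objective: alternative decomposition; not faster).

-- ===== PORT A =====
-- shared same-module helper query_is_value_query, ported step for step (used unchanged by both A and B)
def query_is_value_query (query : String) : Bool :=
  if !(PySem.Str.endswith query "}") then false
  else
    let startIndex := PySem.Str.rfind query "{"
    if startIndex == -1 then false
    else
      let val := PySem.Str.strip (PySem.Str.slice query (some (startIndex + 1)) (some (-1)))
      if PySem.Str.startswith val ">=" || PySem.Str.startswith val "<=" ||
         PySem.Str.startswith val "!=" || PySem.Str.startswith val "<>" then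
        let val := PySem.Str.strip (PySem.Str.slice val (some 2) none)
        let val := if PySem.Str.startswith val "-" then PySem.Str.slice val (some 1) none else val
        PySem.Str.strIsdigit val
      else if PySem.Str.startswith val ">" || PySem.Str.startswith val "<" then
        let val := PySem.Str.strip (PySem.Str.slice val (some 1) none)
        let val := if PySem.Str.startswith val "-" then PySem.Str.slice val (some 1) none else val
        PySem.Str.strIsdigit val
      else false

-- A's loop body over the state (positive, negative, pos_value, neg_value)
def splitStep (r : List String × List String × List String × List String) (q : String) :
    List String × List String × List String × List String :=
  let (pos, neg, posv, negv) := r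
  if PySem.Str.startswith q "-" then
    let q1 := PySem.Str.slice q (some 1) none
    if query_is_value_query q1 then (pos, neg, posv, negv ++ [q1])
    else (pos, neg ++ [q1], posv, negv)
  else if query_is_value_query q then (pos, neg, posv ++ [q], negv)
  else (pos ++ [q], neg, posv, negv)

-- A's retval is a dict literal with four FIXED keys appended to in place; it is modelled as the
-- quadruple of bucket lists carried through the loop, emitted in the dict's insertion order.
def split_query (query : List String) : List (String × List String) :=
  let r := query.foldl splitStep ([], [], [], [])
  [("positive", r.1), ("negative", r.2.1), ("pos_value", r.2.2.1), ("neg_value", r.2.2.2)]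

-- ===== PORT B =====
-- B: four list comprehensions, each its own full scan ([f(q) for q in query if c(q)] = filter-then-map)
def split_query_alt (query : List String) : List (String × List String) :=
  [("positive", query.filter (fun q => !PySem.Str.startswith q "-" && !query_is_value_query q)),
   ("negative", (query.filter (fun q => PySem.Str.startswith q "-" &&
                  !query_is_value_query (PySem.Str.slice q (some 1) none))).map
                  (fun q => PySem.Str.slice q (some 1) none)),
   ("pos_value", query.filter (fun q => !PySem.Str.startswith q "-" && query_is_value_query q)),
   ("neg_value", (query.filter (fun q => PySem.Str.startswith q "-" &&
                  query_is_value_query (PySem.Str.slice q (some 1) none))).map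
                  (fun q => PySem.Str.slice q (some 1) none))]

-- ===== PRECONDITION & SPEC =====
def Spec_split_query (query : List String) (out : List (String × List String)) : Prop := out = split_query_alt query
instance (query : List String) (out : List (String × List String)) : Decidable (Spec_split_query query out) := by unfold Spec_split_query; infer_instance

-- ===== CLAIM (what is proved, stated in full; the proofs are below) =====
def Claim_equal_split_query : Prop := ∀ (query : List String), Dom_split_query query → Spec_split_query query (split_query query)

-- ===== LEMMAS AND PROOFS =====
-- Loop invariant: A's fold from any accumulators appends exactly B's four filtered scans.
theorem split_query_foldl (qs : List String) (pos neg posv negv : List String) :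
    qs.foldl splitStep (pos, neg, posv, negv)
    = (pos ++ qs.filter (fun q => !PySem.Str.startswith q "-" && !query_is_value_query q),
       neg ++ (qs.filter (fun q => PySem.Str.startswith q "-" &&
                !query_is_value_query (PySem.Str.slice q (some 1) none))).map
                (fun q => PySem.Str.slice q (some 1) none),
       posv ++ qs.filter (fun q => !PySem.Str.startswith q "-" && query_is_value_query q),
       negv ++ (qs.filter (fun q => PySem.Str.startswith q "-" &&
                query_is_value_query (PySem.Str.slice q (some 1) none))).map
                (fun q => PySem.Str.slice q (some 1) none)) := by
  induction qs generalizing pos neg posv negv with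
  | nil => simp
  | cons q qs ih =>
    rw [List.foldl_cons]
    by_cases h1 : PySem.Chars.startswith q.toList ['-']
    · by_cases h2 : query_is_value_query (PySem.Str.slice q (some 1) none)
      · rw [show splitStep (pos, neg, posv, negv) q
              = (pos, neg, posv, negv ++ [PySem.Str.slice q (some 1) none]) from by
            simp [splitStep, h1, h2], ih]
        simp [h1, h2, List.append_assoc]
      · rw [show splitStep (pos, neg, posv, negv) q
              = (pos, neg ++ [PySem.Str.slice q (some 1) none], posv, negv) from by
            simp [splitStep, h1, h2], ih]
        simp [h1, h2, List.append_assoc]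
    · by_cases h2 : query_is_value_query q
      · rw [show splitStep (pos, neg, posv, negv) q = (pos, neg, posv ++ [q], negv) from by
            simp [splitStep, h1, h2], ih]
        simp [h1, h2, List.append_assoc]
      · rw [show splitStep (pos, neg, posv, negv) q = (pos ++ [q], neg, posv, negv) from by
            simp [splitStep, h1, h2], ih]
        simp [h1, h2, List.append_assoc]

-- ===== VERDICT (by name: the statement is the Claim_ definition above) =====
theorem split_query_spec : Claim_equal_split_query := by
  intro query _
  unfold Spec_split_query split_query split_query_alt
  rw [split_query_foldl]
  simp
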